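-- pv_equiv track=rewrite | github.com/cemtem/python_lab | second_homework/second_hw_mandatory.py | replacer
-- ===== SOURCE A (Python) =====
-- def replacer(string: str):
--     res = ''
--     for char in string:
--         if char == '\'':
--             res += '\"'
--         elif char == '\"':
--             res += '\''
--         else:
--             res += char
--     return res
-- ===== SOURCE B (Python) =====
-- def replacer(string: str):
--     # swap quotes structurally: cut at single quotes, inside each piece cut at
--     # double quotes and rejoin with single quotes, then rejoin the pieces with
--     # double quotes -- no per-character test anywhere
--     return '"'.join("'".join(part.split('"')) for part in string.split("'"))
-- ===== Notes on version B (the rewrite author's own statement) =====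
-- stated objective: alternative
-- what changed: Replaces the per-character accumulator loop with if/elif/else tests by a structural split/join decomposition: split on single quotes, rejoin each piece's double-quote-split with single quotes, and rejoin the pieces with double quotes; no character is ever tested individually.
import Mathlib
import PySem

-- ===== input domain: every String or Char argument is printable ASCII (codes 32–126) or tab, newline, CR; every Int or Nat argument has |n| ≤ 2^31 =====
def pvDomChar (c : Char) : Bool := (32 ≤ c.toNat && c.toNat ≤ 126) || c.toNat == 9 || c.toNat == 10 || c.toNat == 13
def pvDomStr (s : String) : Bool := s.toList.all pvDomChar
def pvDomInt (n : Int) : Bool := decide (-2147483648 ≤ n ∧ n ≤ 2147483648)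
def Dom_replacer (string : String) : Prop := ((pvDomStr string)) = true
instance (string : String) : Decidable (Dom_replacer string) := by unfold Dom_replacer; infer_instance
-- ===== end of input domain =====

-- B replaces A's per-character accumulator loop by a structural split/join decomposition
-- (split on ', rejoin "-split pieces with ', rejoin pieces with "): an alternative algorithm, same cost.

-- ===== PORT A =====
-- literal port of A: fold over the characters, appending to an accumulator string
def replacer (string : String) : String :=
  string.toList.foldl
    (fun res char =>
      if char = '\'' then res ++ "\""
      else if char = '\"' then res ++ "\'"
      else res ++ String.ofList [char])
    ""

-- ===== PORT B =====
-- '"'.join("'".join(part.split('"')) for part in string.split("'"))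
def replacer_alt (string : String) : String :=
  String.ofList (PySem.Chars.join ['\"']
    ((PySem.Chars.splitOn string.toList ['\'']).map
      (fun part => PySem.Chars.join ['\''] (PySem.Chars.splitOn part ['\"']))))

-- ===== PRECONDITION & SPEC =====
def Spec_replacer (string : String) (out : String) : Prop := out = replacer_alt string
instance (string : String) (out : String) : Decidable (Spec_replacer string out) := by unfold Spec_replacer; infer_instance

-- ===== CLAIM =====
def Claim_equal_replacer : Prop := ∀ (string : String), Dom_replacer string → Spec_replacer string (replacer string)

-- ===== LEMMAS AND PROOFS =====

-- structural recursion equivalent of splitting on a single character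
def splitChar (q : Char) : List Char → List (List Char)
  | [] => [[]]
  | c :: rest =>
      if c = q then [] :: splitChar q rest
      else
        match splitChar q rest with
        | p :: ps => (c :: p) :: ps
        | [] => [[c]]

theorem splitChar_ne_nil (q : Char) (l : List Char) : splitChar q l ≠ [] := by
  cases l with
  | nil => simp [splitChar]
  | cons c rest =>
    simp only [splitChar]
    split_ifs
    · simp
    · cases h : splitChar q rest <;> simp

-- head-tail recomposition of a nonempty list
theorem headI_cons_tail_of_ne_nil {α : Type} [Inhabited α] (l : List α) (h : l ≠ []) :
    l.headI :: l.tail = l := by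
  cases l with
  | nil => exact absurd rfl h
  | cons a t => rfl

-- the fueled splitOn.go with a singleton separator computes splitChar, acc/cur-generalised
theorem splitOn_go_singleton (q : Char) (fuel : Nat) (l cur : List Char)
    (acc : List (List Char)) (hf : l.length < fuel) :
    PySem.Chars.splitOn.go [q] fuel l cur acc =
      acc.reverse ++ ((cur.reverse ++ (splitChar q l).headI) :: (splitChar q l).tail) := by
  induction fuel generalizing l cur acc with
  | zero => omega
  | succ n ih =>
    cases l with
    | nil =>
      rw [PySem.Chars.splitOn.go.eq_def]
      simp [splitChar]
    | cons c rest =>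
      rw [PySem.Chars.splitOn.go.eq_def]
      simp only []
      by_cases hc : c = q
      · have hpre : List.isPrefixOf [q] (c :: rest) = true := by
          simp [List.isPrefixOf, hc]
        rw [if_pos hpre]
        simp only [List.length_cons, List.length_nil, List.drop_succ_cons, List.drop]
        rw [ih rest [] (cur.reverse :: acc) (by simpa using Nat.lt_of_succ_lt_succ hf)]
        simp only [splitChar, if_pos hc, List.reverse_cons, List.append_assoc, List.nil_append,
          List.reverse_nil]
        rw [show ((splitChar q rest).headI :: (splitChar q rest).tail) = splitChar q rest from
          headI_cons_tail_of_ne_nil _ (splitChar_ne_nil q rest)]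
        simp
      · have hpre : List.isPrefixOf [q] (c :: rest) = false := by
          simp [List.isPrefixOf]
          exact fun h => absurd h.symm hc
        rw [if_neg (by simp [hpre])]
        rw [ih rest (c :: cur) acc (by simpa using Nat.lt_of_succ_lt_succ hf)]
        simp only [splitChar, if_neg hc]
        cases h : splitChar q rest with
        | nil => exact absurd h (splitChar_ne_nil q rest)
        | cons p ps => simp

theorem splitOn_singleton (q : Char) (l : List Char) :
    PySem.Chars.splitOn l [q] = splitChar q l := by
  rw [PySem.Chars.splitOn, splitOn_go_singleton q (l.length + 1) l [] [] (Nat.lt_succ_self _)]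
  cases h : splitChar q l with
  | nil => exact absurd h (splitChar_ne_nil q l)
  | cons p ps => simp

-- joining the g-mapped single-character split with [b] is the per-character substitution
theorem join_map_splitChar (a b : Char) (g : Char → Char) (l : List Char) :
    PySem.Chars.join [b] ((splitChar a l).map (List.map g)) =
      l.map (fun c => if c = a then b else g c) := by
  induction l with
  | nil => simp [splitChar, PySem.Chars.join_singleton]
  | cons c rest ih =>
    simp only [splitChar]
    by_cases hc : c = a
    · rw [if_pos hc]
      cases h : splitChar a rest with
      | nil => exact absurd h (splitChar_ne_nil a rest)
      | cons p ps =>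
        rw [h] at ih
        simp only [List.map_cons, PySem.Chars.join_cons_cons, List.map_nil] at ih ⊢
        simp [ih, hc]
    · rw [if_neg hc]
      cases h : splitChar a rest with
      | nil => exact absurd h (splitChar_ne_nil a rest)
      | cons p ps =>
        rw [h] at ih
        cases ps with
        | nil =>
          simp only [List.map_cons, List.map_nil, PySem.Chars.join_singleton] at ih ⊢
          simp [ih, hc]
        | cons p2 ps2 =>
          simp only [List.map_cons, PySem.Chars.join_cons_cons] at ih ⊢
          simp [← ih, hc]

-- characterisation of A's fold: accumulator is a prefix, processing appends the swapped characters
theorem replacer_fold_eq (l : List Char) (acc : String) :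
    l.foldl
      (fun res char =>
        if char = '\'' then res ++ "\""
        else if char = '\"' then res ++ "\'"
        else res ++ String.ofList [char])
      acc =
    acc ++ String.ofList (l.map (fun c => if c = '\'' then '\"' else if c = '\"' then '\'' else c)) := by
  induction l generalizing acc with
  | nil => simp
  | cons c rest ih =>
    simp only [List.foldl_cons, List.map_cons, ih]
    split_ifs with h1 h2 <;> simp [String.ext_iff]

-- B computes the same per-character substitution
theorem replacer_alt_eq (s : String) :
    replacer_alt s =
      String.ofList (s.toList.map (fun c => if c = '\'' then '\"' else if c = '\"' then '\'' else c)) := by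
  rw [replacer_alt, splitOn_singleton]
  have hmap : (splitChar '\'' s.toList).map
      (fun part => PySem.Chars.join ['\''] (PySem.Chars.splitOn part ['\"'])) =
      (splitChar '\'' s.toList).map (List.map (fun c => if c = '\"' then '\'' else c)) := by
    apply List.map_congr_left
    intro p _
    rw [splitOn_singleton]
    have := join_map_splitChar '\"' '\'' id p
    simpa using this
  rw [hmap, join_map_splitChar]

-- ===== VERDICT =====
theorem replacer_spec : Claim_equal_replacer := by
  intro s _
  show _ = _
  rw [replacer, replacer_alt_eq, replacer_fold_eq]
  simp
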